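-- pv_equiv track=rewrite | github.com/Sumit-sinha2004/PALAB_CODES | Lexicographically Largest String After K Deletions.py | maxString
-- ===== SOURCE A (Python) =====
-- def maxString(s, k):
--     stack = []
--
--     for ch in s:
--         while stack and k > 0 and stack[-1] < ch:
--             stack.pop()
--             k -= 1
--         stack.append(ch)
--
--     # If k still remains, remove from end
--     while k > 0:
--         stack.pop()
--         k -= 1
--
--     return "".join(stack)
-- ===== SOURCE B (Python) =====
-- def maxString(s, k):
--     t = list(s)
--     while k > 0 and t:
--         for i in range(len(t) - 1):
--             if t[i] < t[i + 1]:
--                 del t[i]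
--                 break
--         else:
--             t.pop()
--         k -= 1
--     return "".join(t)
-- ===== Notes on version B (the rewrite author's own statement) =====
-- stated objective: alternative
-- what changed: A's one-pass monotonic stack is replaced by repeatedly deleting the first character that is smaller than its right neighbour (or the last character if the string is non-increasing), k times.
import Mathlib
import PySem

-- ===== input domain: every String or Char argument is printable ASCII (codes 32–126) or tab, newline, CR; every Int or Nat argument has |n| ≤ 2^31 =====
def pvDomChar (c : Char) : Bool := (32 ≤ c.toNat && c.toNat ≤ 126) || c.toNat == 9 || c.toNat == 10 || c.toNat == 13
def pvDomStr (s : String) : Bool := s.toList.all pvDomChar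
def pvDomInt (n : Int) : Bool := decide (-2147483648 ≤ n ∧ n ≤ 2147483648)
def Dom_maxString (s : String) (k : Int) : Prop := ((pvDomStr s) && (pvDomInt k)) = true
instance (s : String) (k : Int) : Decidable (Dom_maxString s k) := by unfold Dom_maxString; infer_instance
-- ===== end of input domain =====

-- B replaces A's one-pass monotonic stack by iterated deletion of the first ascending
-- character (an alternative algorithm with the same result; not claimed faster).

-- ===== PORT A =====
-- the inner `while stack and k > 0 and stack[-1] < ch: stack.pop(); k -= 1`
-- (stack kept top-first, i.e. reversed w.r.t. the Python list)
def popLoopA (st : List Char) (k : Int) (ch : Char) : List Char × Int :=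
  match st with
  | [] => ([], k)
  | t :: rest => if 0 < k ∧ t < ch then popLoopA rest (k - 1) ch else (t :: rest, k)

-- one iteration of `for ch in s`: pop loop, then `stack.append(ch)`
def stepA (p : List Char × Int) (ch : Char) : List Char × Int :=
  (ch :: (popLoopA p.1 p.2 ch).1, (popLoopA p.1 p.2 ch).2)

-- the trailing `while k > 0: stack.pop(); k -= 1`, run on the remaining budget
-- k.toNat (= k rounds when 0 < k, 0 rounds otherwise — exactly the while-guard);
-- Python raises IndexError on the empty stack — that case (k > len(s)) is
-- excluded by Pre_, here it yields []
def dropLoopA : List Char → Nat → List Char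
  | st, 0 => st
  | [], _ + 1 => []
  | _ :: rest, n + 1 => dropLoopA rest n

def maxString (s : String) (k : Int) : String :=
  let r := s.toList.foldl stepA ([], k)
  String.ofList (dropLoopA r.1 r.2.toNat).reverse

-- ===== PORT B =====
-- delete the first character smaller than its right neighbour, else the last one
def del1B : List Char → List Char
  | [] => []
  | [_] => []
  | a :: b :: r => if a < b then b :: r else a :: del1B (b :: r)

-- `while k > 0 and t: <delete one char>; k -= 1`; the loop runs at most k.toNat
-- times, so it is transcribed with that budget as structural fuel
def loopB : List Char → Nat → List Char
  | t, 0 => t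
  | t, n + 1 => if t ≠ [] then loopB (del1B t) n else t

def maxString_alt (s : String) (k : Int) : String :=
  String.ofList (loopB s.toList k.toNat)

-- ===== PRECONDITION & SPEC =====
-- exactly the inputs on which the Python A returns normally: if k > len(s) the final
-- `stack.pop()` loop pops from an empty list and raises IndexError
def Pre_maxString (s : String) (k : Int) : Prop := k ≤ (s.length : Int)
instance (s : String) (k : Int) : Decidable (Pre_maxString s k) := by
  unfold Pre_maxString; infer_instance

def pvWitness_maxString : String × Int := ("cbad", 2)

def Spec_maxString (s : String) (k : Int) (out : String) : Prop := out = maxString_alt s k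
instance (s : String) (k : Int) (out : String) : Decidable (Spec_maxString s k out) := by
  unfold Spec_maxString; infer_instance

-- ===== CLAIM (what is proved, stated in full; the proofs are below) =====
def Claim_equal_maxString : Prop :=
  ∀ (s : String) (k : Int), Dom_maxString s k → Pre_maxString s k →
    Spec_maxString s k (maxString s k)

-- ===== LEMMAS AND PROOFS =====

theorem popLoopA_nonpos (st : List Char) (k : Int) (ch : Char) (hk : ¬ 0 < k) :
    popLoopA st k ch = (st, k) := by
  cases st with
  | nil => rfl
  | cons t rest => simp [popLoopA, hk]

theorem foldl_stepA_nonpos (t : List Char) (st : List Char) (k : Int) (hk : ¬ 0 < k) :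
    t.foldl stepA (st, k) = (t.reverse ++ st, k) := by
  induction t generalizing st with
  | nil => simp
  | cons a t ih =>
      simp only [List.foldl_cons, stepA, popLoopA_nonpos st k a hk]
      rw [ih (a :: st)]
      simp

theorem dropLoopA_nil (n : Nat) : dropLoopA [] n = [] := by
  cases n <;> rfl

-- no pop fires when the stack top is not smaller than the incoming character
theorem popLoopA_head (st : List Char) (k : Int) (ch : Char)
    (h : ∀ x, st.head? = some x → ¬ x < ch) : popLoopA st k ch = (st, k) := by
  cases st with
  | nil => rfl
  | cons t rest =>
      have := h t rfl
      simp [popLoopA, this]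

-- core step: processing s with budget k equals processing s with its first
-- ascending character deleted, with budget k - 1
theorem core_step (s : List Char) (st : List Char) (k : Int) (hk : 0 < k) (hs : s ≠ [])
    (hOK : ∀ x a, st.head? = some x → s.head? = some a → ¬ x < a) :
    dropLoopA (s.foldl stepA (st, k)).1 (s.foldl stepA (st, k)).2.toNat =
    dropLoopA ((del1B s).foldl stepA (st, k - 1)).1 ((del1B s).foldl stepA (st, k - 1)).2.toNat := by
  induction s generalizing st k with
  | nil => exact absurd rfl hs
  | cons a s' ih =>
      have hpopa : ∀ (k' : Int), popLoopA st k' a = (st, k') := fun k' =>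
        popLoopA_head st k' a (fun x hx => hOK x a hx rfl)
      cases s' with
      | nil =>
          simp only [List.foldl_cons, List.foldl_nil, stepA, hpopa, del1B]
          have hm : k.toNat = (k - 1).toNat + 1 := by omega
          rw [hm]
          rfl
      | cons b r =>
          by_cases hab : a < b
          · have h1 : stepA (st, k) a = (a :: st, k) := by simp [stepA, hpopa]
            have h2 : stepA (a :: st, k) b = stepA (st, k - 1) b := by
              simp [stepA, popLoopA, hk, hab]
            have hdel : del1B (a :: b :: r) = b :: r := by simp [del1B, hab]
            rw [hdel]
            simp only [List.foldl_cons, h1, h2]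
          · have h1 : stepA (st, k) a = (a :: st, k) := by simp [stepA, hpopa]
            have h1' : stepA (st, k - 1) a = (a :: st, k - 1) := by simp [stepA, hpopa]
            have hdel : del1B (a :: b :: r) = a :: del1B (b :: r) := by simp [del1B, hab]
            rw [hdel]
            simp only [List.foldl_cons, h1, h1']
            exact ih (a :: st) k hk (by simp) (by
              intro x c hx hc
              simp only [List.head?_cons, Option.some.injEq] at hx hc
              subst hx; subst hc; exact hab)

-- the whole of A equals the whole of B, on char lists
theorem runEq (n : Nat) : ∀ (k : Int) (t : List Char), k.toNat ≤ n →
    (dropLoopA (t.foldl stepA ([], k)).1 (t.foldl stepA ([], k)).2.toNat).reverse =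
    loopB t k.toNat := by
  induction n with
  | zero =>
      intro k t hn
      have hk : ¬ 0 < k := by omega
      have h0 : k.toNat = 0 := by omega
      rw [foldl_stepA_nonpos t [] k hk, h0]
      simp [dropLoopA, loopB]
  | succ n ih =>
      intro k t hn
      by_cases hk : 0 < k
      · have hm : k.toNat = (k - 1).toNat + 1 := by omega
        cases t with
        | nil =>
            rw [hm]
            simp only [List.foldl_nil]
            rw [dropLoopA_nil]
            rfl
        | cons a t' =>
            rw [core_step (a :: t') [] k hk (by simp) (by intro x c hx; simp at hx), hm]
            have : loopB (a :: t') ((k - 1).toNat + 1) = loopB (del1B (a :: t')) ((k - 1).toNat) := by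
              simp [loopB]
            rw [this]
            exact ih (k - 1) (del1B (a :: t')) (by omega)
      · have h0 : k.toNat = 0 := by omega
        rw [foldl_stepA_nonpos t [] k hk, h0]
        simp [dropLoopA, loopB]

-- ===== VERDICT (by name: the statement is the Claim_ definition above) =====
theorem maxString_spec : Claim_equal_maxString := by
  intro s k _ _
  unfold Spec_maxString maxString maxString_alt
  exact congrArg String.ofList (runEq k.toNat k s.toList le_rfl)
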